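-- pv_equiv track=rewrite | github.com/LunaTMT/LeetCode-Python | Maximum_Enemy_Forts_That_Can_Be_Captured.py | captureForts
-- ===== SOURCE A (Python) =====
-- def captureForts(forts: list[int]) -> int:
--
--     opposites = { 1: -1,
--                 -1: 1}
--     current = None
--     i = 0
--     count = 0
--     res = 0
--     start = False
--     while i < len(forts):
--         if (current := forts[i]) in opposites:
--
--             if start and (current != starting_value):
--                 res = max(res, count)
--             else:
--                 start = True
--
--             starting_value = forts[i]
--             count = 0
--         else:
--             count += 1
--         i += 1
--     return res
-- ===== SOURCE B (Python) =====
-- def captureForts(forts: list[int]) -> int: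
--     pos = [(i, v) for i, v in enumerate(forts) if v in (1, -1)]
--     res = 0
--     for (i1, v1), (i2, v2) in zip(pos, pos[1:]):
--         if v1 != v2:
--             res = max(res, i2 - i1 - 1)
--     return res
-- ===== Notes on version B (the rewrite author's own statement) =====
-- stated objective: simpler
-- what changed: B replaces A's stateful while-loop (count/res/start/starting_value machine) with a filter of marker indices followed by a scan over adjacent index pairs, computing each gap as an index difference.
import Mathlib
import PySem

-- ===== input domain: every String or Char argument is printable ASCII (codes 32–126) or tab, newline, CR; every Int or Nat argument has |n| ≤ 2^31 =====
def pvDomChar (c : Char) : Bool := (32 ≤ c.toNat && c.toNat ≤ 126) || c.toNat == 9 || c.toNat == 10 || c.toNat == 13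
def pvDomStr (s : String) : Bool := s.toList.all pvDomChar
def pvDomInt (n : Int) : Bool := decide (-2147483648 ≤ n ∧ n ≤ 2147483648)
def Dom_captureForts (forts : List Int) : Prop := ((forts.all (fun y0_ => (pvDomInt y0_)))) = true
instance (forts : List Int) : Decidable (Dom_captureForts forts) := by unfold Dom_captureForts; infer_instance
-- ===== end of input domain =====

-- B replaces A's stateful while-loop with a filter of the ±1 marker indices plus a scan
-- over adjacent pairs (objective: simpler; same return value, no side effects).

-- ===== PORT A =====
-- state: (count, res, start, starting_value); the while-loop over indices becomes a foldl
-- over the list (the loop reads only forts[i] at step i). starting_value is read only when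
-- start = true, at which point it has been assigned; its initial 0 is never read.
def captureForts (forts : List Int) : Int :=
  (forts.foldl
    (fun (st : Int × Int × Bool × Int) current =>
      let (count, res, start, sv) := st
      if current = 1 ∨ current = -1 then
        (0, if start ∧ current ≠ sv then max res count else res, true, current)
      else
        (count + 1, res, start, sv))
    (0, 0, false, 0)).2.1

-- ===== PORT B =====
def captureForts_alt (forts : List Int) : Int :=
  let pos := (PySem.List.enumerate forts).filter (fun p => p.2 = 1 ∨ p.2 = -1)
  (pos.zip pos.tail).foldl
    (fun res pq => if pq.1.2 ≠ pq.2.2 then max res (pq.2.1 - pq.1.1 - 1) else res) 0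

-- ===== PRECONDITION & SPEC =====
def Spec_captureForts (forts : List Int) (out : Int) : Prop := out = captureForts_alt forts
instance (forts : List Int) (out : Int) : Decidable (Spec_captureForts forts out) := by unfold Spec_captureForts; infer_instance

-- ===== CLAIM (what is proved, stated in full; the proofs are below) =====
def Claim_equal_captureForts : Prop := ∀ (forts : List Int), Dom_captureForts forts → Spec_captureForts forts (captureForts forts)

-- ===== LEMMAS AND PROOFS =====

-- A's loop body, named for the proofs
def aStep (st : Int × Int × Bool × Int) (current : Int) : Int × Int × Bool × Int :=
  let (count, res, start, sv) := st
  if current = 1 ∨ current = -1 then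
    (0, if start ∧ current ≠ sv then max res count else res, true, current)
  else
    (count + 1, res, start, sv)

-- B's pair-scan, with a general initial accumulator
def pfold (zs : List (Int × Int)) (r : Int) : Int :=
  (zs.zip zs.tail).foldl
    (fun res pq => if pq.1.2 ≠ pq.2.2 then max res (pq.2.1 - pq.1.1 - 1) else res) r

-- the filtered enumeration of a suffix starting at index j
def filtF (j : Int) (l : List Int) : List (Int × Int) :=
  (PySem.List.enumerate l j).filter (fun p => p.2 = 1 ∨ p.2 = -1)

theorem filtF_cons (j : Int) (v : Int) (t : List Int) :
    filtF j (v :: t) =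
      if v = 1 ∨ v = -1 then (j, v) :: filtF (j + 1) t else filtF (j + 1) t := by
  by_cases hv : v = 1 ∨ v = -1 <;>
    simp [filtF, PySem.List.enumerate_cons, hv]

theorem pfold_cons_cons (a b : Int × Int) (t : List (Int × Int)) (r : Int) :
    pfold (a :: b :: t) r =
      pfold (b :: t) (if a.2 ≠ b.2 then max r (b.1 - a.1 - 1) else r) := by
  simp [pfold]

-- main invariant, start = true case: the loop on the suffix l, with `count` cells since the
-- last marker (p, sv) and current index j = p + count + 1, equals B's scan of (p,sv) :: filtF j l
theorem loop_true (l : List Int) : ∀ (j p count res sv : Int), j = p + count + 1 →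
    (l.foldl aStep (count, res, true, sv)).2.1 = pfold ((p, sv) :: filtF j l) res := by
  induction l with
  | nil =>
    intro j p count res sv _
    simp [filtF, PySem.List.enumerate, pfold]
  | cons v t ih =>
    intro j p count res sv hj
    rw [List.foldl_cons, filtF_cons]
    by_cases hv : v = 1 ∨ v = -1
    · rw [if_pos hv, pfold_cons_cons]
      simp only [aStep, if_pos hv, true_and]
      rw [ih (j + 1) j 0 (if v ≠ sv then max res count else res) v (by omega)]
      congr 1
      show (if v ≠ sv then max res count else res) = if sv ≠ v then max res (j - p - 1) else res
      split_ifs <;> omega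
    · rw [if_neg hv]
      simp only [aStep, if_neg hv]
      exact ih (j + 1) p (count + 1) res sv (by omega)

-- start = false case: no marker seen yet; the result is B's scan of filtF j l from res
theorem loop_false (l : List Int) : ∀ (j count res sv : Int),
    (l.foldl aStep (count, res, false, sv)).2.1 = pfold (filtF j l) res := by
  induction l with
  | nil =>
    intro j count res sv
    simp [filtF, PySem.List.enumerate, pfold]
  | cons v t ih =>
    intro j count res sv
    rw [List.foldl_cons, filtF_cons]
    by_cases hv : v = 1 ∨ v = -1
    · rw [if_pos hv]
      simp only [aStep, if_pos hv]
      have := loop_true t (j + 1) j 0 res v (by omega)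
      simpa using this
    · rw [if_neg hv]
      simp only [aStep, if_neg hv]
      exact ih (j + 1) (count + 1) res sv

-- ===== VERDICT (by name: the statement is the Claim_ definition above) =====
theorem captureForts_spec : Claim_equal_captureForts := by
  intro forts _
  unfold Spec_captureForts captureForts captureForts_alt
  have h : (forts.foldl aStep (0, 0, false, 0)).2.1 = pfold (filtF 0 forts) 0 :=
    loop_false forts 0 0 0 0
  have hstep : (fun (st : Int × Int × Bool × Int) current =>
      let (count, res, start, sv) := st
      if current = 1 ∨ current = -1 then
        (0, if start ∧ current ≠ sv then max res count else res, true, current)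
      else
        (count + 1, res, start, sv)) = aStep := rfl
  rw [hstep, h]
  rfl
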